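-- pv_equiv track=rewrite | github.com/pooreunblue/Coding-Algorithm | 프로그래머스/3/81303. 표 편집/표 편집.py | solution
-- ===== SOURCE A (Python) =====
-- def solution(n, k, cmd):
--     delete = []
--     up = [i-1 for i in range(n+2)]
--     down = [i+1 for i in range(n+2)]
--     k += 1
--     for i in cmd:
--         if i == 'C':
--             delete.append(k)
--             up[down[k]] = up[k]
--             down[up[k]] = down[k]
--             k = up[k] if down[k] > n else down[k]
--         elif i == 'Z':
--             restore = delete.pop()
--             up[down[restore]] = restore
--             down[up[restore]] = restore
--         else:
--             dir, num = i.split()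
--             if dir == 'U':
--                 for _ in range(int(num)):
--                     k = up[k]
--             else:
--                 for _ in range(int(num)):
--                     k = down[k]
--
--     a = ['O']*n
--     for i in delete:
--         a[i-1] = 'X'
--     return(''.join(a))
-- ===== SOURCE B (Python) =====
-- def solution(n, k, cmd):
--     alive = list(range(1, n + 1))
--     cur = k
--     stack = []
--     for c in cmd:
--         if c == 'C':
--             stack.append(alive.pop(cur))
--             if cur == len(alive):
--                 cur -= 1
--         elif c == 'Z':
--             d = stack.pop()
--             pos = 0
--             while pos < len(alive) and alive[pos] < d:
--                 pos += 1
--             alive.insert(pos, d)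
--             if pos <= cur:
--                 cur += 1
--         else:
--             direction, num = c.split()
--             if direction == 'U':
--                 cur -= int(num)
--             else:
--                 cur += int(num)
--     out = ['O'] * n
--     for d in stack:
--         out[d - 1] = 'X'
--     return ''.join(out)
-- ===== Notes on version B (the rewrite author's own statement) =====
-- stated objective: faster
-- what changed: Replaces A's doubly linked list over arrays (with per-step pointer chasing for U/D moves) by a sorted list of surviving rows plus an integer cursor position, so U/D become O(1) arithmetic instead of num pointer steps, with an undo stack driving C/Z.
-- outside the precondition, e.g. on solution(2, 0, ['D -1', 'C']): A returns 'XO', B returns 'OX'; on solution(2, 0, ['U 1', 'C']): A returns 'OX', B returns 'OX'; on solution(1, 0, ['C']): A returns 'X', B returns 'X'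
import Mathlib
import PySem

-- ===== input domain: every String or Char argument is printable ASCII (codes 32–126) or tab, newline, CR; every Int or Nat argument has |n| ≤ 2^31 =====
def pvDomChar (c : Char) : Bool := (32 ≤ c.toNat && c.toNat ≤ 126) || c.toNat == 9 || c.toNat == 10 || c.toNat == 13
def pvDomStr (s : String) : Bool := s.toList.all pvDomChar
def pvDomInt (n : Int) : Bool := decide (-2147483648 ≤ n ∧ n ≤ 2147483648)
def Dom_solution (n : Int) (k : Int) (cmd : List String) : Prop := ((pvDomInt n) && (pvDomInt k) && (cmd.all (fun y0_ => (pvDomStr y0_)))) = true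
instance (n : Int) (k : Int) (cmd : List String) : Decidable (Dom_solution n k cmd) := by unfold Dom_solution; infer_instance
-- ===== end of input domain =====

-- B replaces A's array-encoded doubly linked list (pointer chased step by step on 'U num'/'D num')
-- by a sorted list of surviving rows plus an integer cursor position: moves become O(1) arithmetic.
-- Equivalence is proved on Pre_solution (the puzzle's validity contract, checked exactly).

-- ===== PORT A =====
-- one command of A's loop; state = (delete, up, down, k)
def solAStep (n : Int) (s : List Int × List Int × List Int × Int) (i : String) :
    List Int × List Int × List Int × Int :=
  let delete := s.1; let up := s.2.1; let down := s.2.2.1; let k := s.2.2.2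
  if i == "C" then
    let delete := delete ++ [k]
    let up := PySem.List.pySetD up (PySem.List.pyGetD down k 0) (PySem.List.pyGetD up k 0)
    let down := PySem.List.pySetD down (PySem.List.pyGetD up k 0) (PySem.List.pyGetD down k 0)
    let k := if PySem.List.pyGetD down k 0 > n then PySem.List.pyGetD up k 0
             else PySem.List.pyGetD down k 0
    (delete, up, down, k)
  else if i == "Z" then
    match PySem.List.pop? delete (-1) with
    | none => (delete, up, down, k)          -- IndexError on empty pop: unreachable under Pre_
    | some (restore, delete) =>
      let up := PySem.List.pySetD up (PySem.List.pyGetD down restore 0) restore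
      let down := PySem.List.pySetD down (PySem.List.pyGetD up restore 0) restore
      (delete, up, down, k)
  else
    match PySem.Str.split₀ i with
    | [dir, num] =>
      match PySem.Int.ofStr? num with
      | some v =>
        if dir == "U" then
          (delete, up, down, (PySem.List.pyRange 0 v 1).foldl (fun k _ => PySem.List.pyGetD up k 0) k)
        else
          (delete, up, down, (PySem.List.pyRange 0 v 1).foldl (fun k _ => PySem.List.pyGetD down k 0) k)
      | none => (delete, up, down, k)        -- ValueError from int(num): unreachable under Pre_
    | _ => (delete, up, down, k)             -- unpacking error: unreachable under Pre_

def solution (n : Int) (k : Int) (cmd : List String) : String :=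
  let delete : List Int := []
  let up : List Int := (PySem.List.pyRange 0 (n+2) 1).map (fun i => i - 1)
  let down : List Int := (PySem.List.pyRange 0 (n+2) 1).map (fun i => i + 1)
  let k := k + 1
  let s := cmd.foldl (solAStep n) (delete, up, down, k)
  let a : List Char := List.replicate n.toNat 'O'
  let a := s.1.foldl (fun a i => PySem.List.pySetD a (i - 1) 'X') a
  String.ofList a

-- ===== PORT B =====
-- Source B's while loop locating where d goes back into the sorted alive list
def insPos (alive : List Int) (d : Int) : Nat :=
  match alive with
  | [] => 0
  | x :: xs => if x < d then insPos xs d + 1 else 0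

-- one command of B's loop; state = (alive, cur, stack)
def solBStep (s : List Int × Int × List Int) (c : String) : List Int × Int × List Int :=
  let alive := s.1; let cur := s.2.1; let stack := s.2.2
  if c == "C" then
    match PySem.List.pop? alive cur with
    | none => (alive, cur, stack)            -- IndexError: unreachable under Pre_
    | some (d, alive) =>
      let stack := stack ++ [d]
      let cur := if cur == (alive.length : Int) then cur - 1 else cur
      (alive, cur, stack)
  else if c == "Z" then
    match PySem.List.pop? stack (-1) with
    | none => (alive, cur, stack)            -- IndexError on empty pop: unreachable under Pre_
    | some (d, stack) =>
      let pos := insPos alive d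
      let alive := PySem.List.insert alive (pos : Int) d
      let cur := if (pos : Int) ≤ cur then cur + 1 else cur
      (alive, cur, stack)
  else
    match PySem.Str.split₀ c with
    | [dir, num] =>
      match PySem.Int.ofStr? num with
      | some v => (alive, if dir == "U" then cur - v else cur + v, stack)
      | none => (alive, cur, stack)          -- ValueError: unreachable under Pre_
    | _ => (alive, cur, stack)               -- unpacking error: unreachable under Pre_

def solution_alt (n : Int) (k : Int) (cmd : List String) : String :=
  let s := cmd.foldl solBStep (PySem.List.pyRange 1 (n+1) 1, k, ([] : List Int))
  let out : List Char := List.replicate n.toNat 'O'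
  let out := s.2.2.foldl (fun out d => PySem.List.pySetD out (d - 1) 'X') out
  String.ofList out

-- ===== PRECONDITION & SPEC =====
-- parse of a move command: some (is 'U', steps) when it splits into two tokens with an int second token
def moveOk (c : String) : Option (Bool × Int) :=
  match PySem.Str.split₀ c with
  | [dir, num] =>
    match PySem.Int.ofStr? num with
    | some v => some (dir == "U", v)
    | none => none
  | _ => none

-- interval-compressed validity checker: the surviving rows are kept as a list of disjoint
-- ascending ranges (a, b) = rows a..b, so one checker step costs O(#intervals), independent of n
def ivLen (ivs : List (Int × Int)) : Int :=
  match ivs with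
  | [] => 0
  | (a, b) :: rest => (b - a + 1) + ivLen rest

def ivGet (ivs : List (Int × Int)) (p : Int) : Int :=
  match ivs with
  | [] => 0
  | (a, b) :: rest => if p < b - a + 1 then a + p else ivGet rest (p - (b - a + 1))

def ivErase (ivs : List (Int × Int)) (p : Int) : List (Int × Int) :=
  match ivs with
  | [] => []
  | (a, b) :: rest =>
    if p < b - a + 1 then
      (if 1 ≤ p then [(a, a + p - 1)] else []) ++
      (if a + p + 1 ≤ b then [(a + p + 1, b)] else []) ++ rest
    else (a, b) :: ivErase rest (p - (b - a + 1))

def ivInsert (ivs : List (Int × Int)) (d : Int) : Option (List (Int × Int)) :=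
  match ivs with
  | [] => some [(d, d)]
  | (a, b) :: rest =>
    if d < a then some ((d, d) :: (a, b) :: rest)
    else if d ≤ b then none
    else (ivInsert rest d).map (fun r => (a, b) :: r)

def ivCountLt (ivs : List (Int × Int)) (d : Int) : Int :=
  match ivs with
  | [] => 0
  | (a, b) :: rest => if d ≤ b then max 0 (d - a) else (b - a + 1) + ivCountLt rest d

-- one step of the puzzle contract over (surviving row ranges, cursor index, undo stack);
-- none = the command sequence leaves the contract (malformed/negative move, cursor off the table,
-- 'Z' with nothing deleted, 'C' emptying the table)
def ivStep (c : String) (s : List (Int × Int) × Int × List Int) :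
    Option (List (Int × Int) × Int × List Int) :=
  let ivs := s.1; let cur := s.2.1; let stk := s.2.2
  if c == "C" then
    if 2 ≤ ivLen ivs ∧ 0 ≤ cur ∧ cur < ivLen ivs then
      some (ivErase ivs cur, (if cur = ivLen ivs - 1 then cur - 1 else cur),
            stk ++ [ivGet ivs cur])
    else none
  else if c == "Z" then
    match stk.reverse with
    | [] => none
    | y :: rest =>
      match ivInsert ivs y with
      | none => none
      | some ivs' => some (ivs', (if ivCountLt ivs y ≤ cur then cur + 1 else cur), rest.reverse)
  else
    match moveOk c with
    | some (true, v) => if 0 ≤ v ∧ v ≤ cur then some (ivs, cur - v, stk) else none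
    | some (false, v) =>
      if 0 ≤ v ∧ cur + v ≤ ivLen ivs - 1 then some (ivs, cur + v, stk) else none
    | none => none

-- second admissible regime: a command list with no 'C'/'Z' at all; then the output of both programs is
-- all 'O's, and A returns normally iff its cursor walk (with Python's negative-index wraparound, closed
-- form: position+1 tracked modulo n+2, with n+3 as the dead position past the bottom sentinel) never
-- indexes out of range.  t is that walk state
def walkOk (n : Int) (t : Int) (c : String) : Option Int :=
  if c == "C" || c == "Z" then none
  else
    match moveOk c with
    | some (u, v) =>
      if v ≤ 0 then some t
      else if t = n + 3 then none
      else if u then some ((t - v) % (n + 2))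
      else if t = 0 then (if 2 ≤ v then none else some (n + 3))
      else if t + v > n + 3 then none
      else some (t + v)
    | none => none

-- Pre_ = an empty command list (both programs return 'O'*n untouched, for any n and k), OR the
-- puzzle's validity contract (n ≥ 1, 0 ≤ k < n, well-formed 'U x'/'D x'/'C'/'Z' commands with
-- nonnegative move counts, the cursor never moved off the table, 'Z' only with a pending deletion,
-- 'C' never emptying the table — checked exactly over interval-compressed state, so every
-- in-contract input is admitted), OR a
-- 'C'/'Z'-free command list whose cursor walk stays in A's arrays (both programs then return all
-- 'O's).  Excluded while A still returns: sequences outside the puzzle's guarantees — negative move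
-- counts, a cursor steered off the table before a 'C'/'Z', or a 'C' on the last row — unspecified
-- corners on which A's value (via Python negative indexing / sentinel rows) and B's are both accidental.
def Pre_solution (n : Int) (k : Int) (cmd : List String) : Prop :=
  cmd = [] ∨
  (1 ≤ n ∧ 0 ≤ k ∧ k ≤ n - 1 ∧
   ((cmd.foldl (fun s c => s.bind (ivStep c))
       (some ([(1, n)], k, ([] : List Int)))).isSome = true ∨
    (cmd.foldl (fun s c => s.bind (fun t => walkOk n t c)) (some (k + 2))).isSome = true))

instance (n : Int) (k : Int) (cmd : List String) : Decidable (Pre_solution n k cmd) := by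
  unfold Pre_solution; infer_instance

def pvWitness_solution : Int × Int × List String := (4, 1, ["D 2", "C", "C", "U 1", "Z", "C"])

def Spec_solution (n : Int) (k : Int) (cmd : List String) (out : String) : Prop := out = solution_alt n k cmd
instance (n : Int) (k : Int) (cmd : List String) (out : String) : Decidable (Spec_solution n k cmd out) := by unfold Spec_solution; infer_instance

-- ===== CLAIM (what is proved, stated in full; the proofs are below) =====
def Claim_equal_solution : Prop := ∀ (n : Int) (k : Int) (cmd : List String), Dom_solution n k cmd → Pre_solution n k cmd → Spec_solution n k cmd (solution n k cmd)

-- ===== LEMMAS AND PROOFS =====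

-- list-level image of the checker (proof-side): the same contract over the explicit list of
-- surviving rows, the shape the simulation proof relates to both ports
def okStep (c : String) (s : List Int × Int × List Int) : Option (List Int × Int × List Int) :=
  let alive := s.1; let cur := s.2.1; let stk := s.2.2
  if c == "C" then
    if 2 ≤ alive.length ∧ 0 ≤ cur ∧ cur < (alive.length : Int) then
      some (alive.eraseIdx cur.toNat,
            (if cur = ((alive.eraseIdx cur.toNat).length : Int) then cur - 1 else cur),
            stk ++ [alive.getD cur.toNat 0])
    else none
  else if c == "Z" then
    match stk.reverse with
    | [] => none
    | y :: rest =>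
      let p := insPos alive y
      some (alive.take p ++ y :: alive.drop p,
            (if (p : Int) ≤ cur then cur + 1 else cur), rest.reverse)
  else
    match moveOk c with
    | some (true, v) => if 0 ≤ v ∧ v ≤ cur then some (alive, cur - v, stk) else none
    | some (false, v) =>
      if 0 ≤ v ∧ cur + v ≤ (alive.length : Int) - 1 then some (alive, cur + v, stk) else none
    | none => none

-- expansion of the interval state into the explicit row list
def ivFlat (ivs : List (Int × Int)) : List Int :=
  match ivs with
  | [] => []
  | (a, b) :: rest => PySem.List.pyRange a (b+1) 1 ++ ivFlat rest

-- the intervals are nonempty and strictly ascending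
def IvSorted : List (Int × Int) → Prop
  | [] => True
  | (a, b) :: rest => a ≤ b ∧ (∀ q ∈ rest, b < q.1) ∧ IvSorted rest

-- the linked list's node sequence: sentinel 0, the surviving rows, sentinel n+1
def extGet (n : Int) (alive : List Int) (i : Nat) : Int := (0 :: alive ++ [n+1]).getD i 0

-- the chain invariant: up/down encode exactly the doubly linked list over 0 :: alive ++ [n+1]
def chainOK (n : Int) (up down : List Int) (alive : List Int) : Prop :=
  ∀ i : Nat, i + 1 < alive.length + 2 →
    PySem.List.pyGetD down (extGet n alive i) 0 = extGet n alive (i+1) ∧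
    PySem.List.pyGetD up (extGet n alive (i+1)) 0 = extGet n alive i

-- stack invariant, stack given TOP FIRST: the top's stale pointers are its neighbours in the current
-- alive list; deeper entries see the list with the later deletions undone
def stkOK (n : Int) (up down : List Int) : List Int → List Int → Prop
  | _alive, [] => True
  | alive, d :: rest =>
      1 ≤ d ∧ d ≤ n ∧ d ∉ alive ∧
      PySem.List.pyGetD up d 0 = extGet n alive (insPos alive d) ∧
      PySem.List.pyGetD down d 0 = extGet n alive (insPos alive d + 1) ∧
      stkOK n up down (PySem.List.insert alive (insPos alive d : Int) d) rest

-- full simulation relation between A's state and B's state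
def Good (n : Int) (sA : List Int × List Int × List Int × Int)
    (sB : List Int × Int × List Int) : Prop :=
  sA.1 = sB.2.2 ∧
  sA.2.1.length = (n+2).toNat ∧ sA.2.2.1.length = (n+2).toNat ∧
  sB.1.Pairwise (· < ·) ∧ (∀ x ∈ sB.1, 1 ≤ x ∧ x ≤ n) ∧
  0 ≤ sB.2.1 ∧ sB.2.1 < (sB.1.length : Int) ∧
  PySem.List.pyGetD sB.1 sB.2.1 0 = sA.2.2.2 ∧
  chainOK n sA.2.1 sA.2.2.1 sB.1 ∧
  stkOK n sA.2.1 sA.2.2.1 sB.1 sB.2.2.reverse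

-- ---- generic array get/set facts ----
lemma getD_setD (xs : List Int) (i j : Int) (v d : Int) (h0 : 0 ≤ i) (h2 : 0 ≤ j)
    (h3 : j < (xs.length : Int)) :
    PySem.List.pyGetD (PySem.List.pySetD xs i v) j d =
      if j = i then v else PySem.List.pyGetD xs j d := by
  rw [PySem.List.pySetD_of_nonneg xs v h0]
  have hlen : j < (((xs.set i.toNat v).length : Nat) : Int) := by simpa using h3
  rw [PySem.List.pyGetD_eq_getElem _ d h2 hlen, List.getElem_set]
  by_cases h : j = i
  · rw [if_pos (by omega), if_pos h]
  · rw [if_neg (by omega), if_neg h, PySem.List.pyGetD_eq_getElem xs d h2 h3]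

-- ---- extGet facts ----
lemma extGet_zero (n : Int) (alive : List Int) : extGet n alive 0 = 0 := rfl

lemma extGet_succ_of_lt (n : Int) (alive : List Int) (i : Nat) (h : i < alive.length) :
    extGet n alive (i+1) = alive[i] := by
  simp [extGet, List.getD_eq_getElem?_getD, List.getElem?_append, h]

lemma extGet_last (n : Int) (alive : List Int) : extGet n alive (alive.length + 1) = n + 1 := by
  simp [extGet, List.getD_eq_getElem?_getD, List.getElem?_append]

lemma ext_pairwise (n : Int) (alive : List Int) (hn : 0 ≤ n) (hs : alive.Pairwise (· < ·))
    (hb : ∀ x ∈ alive, 1 ≤ x ∧ x ≤ n) : (0 :: alive ++ [n+1]).Pairwise (· < ·) := by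
  refine List.Pairwise.cons ?_ ?_
  · intro a ha
    rcases List.mem_append.1 ha with h | h
    · have := (hb a h).1; omega
    · simp only [List.mem_singleton] at h; omega
  · refine List.pairwise_append.mpr ⟨hs, by simp, ?_⟩
    intro a ha b hb'
    simp only [List.mem_singleton] at hb'
    subst hb'
    have := (hb a ha).2; omega

lemma extGet_lt (n : Int) (alive : List Int) (hn : 0 ≤ n) (hs : alive.Pairwise (· < ·))
    (hb : ∀ x ∈ alive, 1 ≤ x ∧ x ≤ n) (i j : Nat) (hij : i < j) (hj : j < alive.length + 2) :
    extGet n alive i < extGet n alive j := by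
  have hp := ext_pairwise n alive hn hs hb
  rw [List.pairwise_iff_getElem] at hp
  have hlen : (0 :: alive ++ [n+1]).length = alive.length + 2 := by simp
  have h := hp i j (by omega) (by omega) hij
  have e1 : extGet n alive i = (0 :: alive ++ [n+1])[i]'(by omega) :=
    List.getD_eq_getElem _ _ (by omega)
  have e2 : extGet n alive j = (0 :: alive ++ [n+1])[j]'(by omega) :=
    List.getD_eq_getElem _ _ (by omega)
  rw [e1, e2]; exact h

lemma extGet_bounds (n : Int) (alive : List Int) (hn : 0 ≤ n)
    (hb : ∀ x ∈ alive, 1 ≤ x ∧ x ≤ n) (i : Nat) (hi : i < alive.length + 2) :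
    0 ≤ extGet n alive i ∧ extGet n alive i ≤ n + 1 := by
  match i with
  | 0 => rw [extGet_zero]; omega
  | Nat.succ i =>
    by_cases h : i < alive.length
    · rw [Nat.succ_eq_add_one, extGet_succ_of_lt n alive i h]
      have := hb alive[i] (by simp)
      omega
    · rw [show i.succ = alive.length + 1 by omega, extGet_last]
      omega

lemma extGet_mem (n : Int) (alive : List Int) (i : Nat) (h1 : 1 ≤ i) (h2 : i < alive.length + 1) :
    extGet n alive i ∈ alive := by
  obtain ⟨j, rfl⟩ : ∃ j, i = j + 1 := ⟨i - 1, by omega⟩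
  rw [extGet_succ_of_lt n alive j (by omega)]
  exact List.getElem_mem _

lemma extGet_eraseIdx (n : Int) (alive : List Int) (c : Nat) (hc : c < alive.length) (i : Nat) :
    extGet n (alive.eraseIdx c) i = if i ≤ c then extGet n alive i else extGet n alive (i+1) := by
  have hl : (alive.eraseIdx c).length = alive.length - 1 := by rw [List.length_eraseIdx, if_pos hc]
  match i with
  | 0 => simp [extGet_zero]
  | Nat.succ i =>
    show (0 :: (alive.eraseIdx c ++ [n+1])).getD (i+1) 0 = _
    rw [List.getD_eq_getElem?_getD, List.getElem?_cons_succ, List.getElem?_append, hl]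
    by_cases hcase : i + 1 ≤ c
    · rw [if_pos hcase, if_pos (by omega : i < alive.length - 1),
        List.getElem?_eraseIdx, if_pos (by omega : i < c)]
      show _ = (0 :: (alive ++ [n+1])).getD (i+1) 0
      rw [List.getD_eq_getElem?_getD, List.getElem?_cons_succ, List.getElem?_append,
        if_pos (by omega : i < alive.length)]
    · rw [if_neg hcase]
      by_cases h1 : i < alive.length - 1
      · rw [if_pos h1, List.getElem?_eraseIdx, if_neg (by omega : ¬ i < c)]
        show _ = (0 :: (alive ++ [n+1])).getD (i+1+1) 0
        rw [List.getD_eq_getElem?_getD, List.getElem?_cons_succ, List.getElem?_append,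
          if_pos (by omega : i + 1 < alive.length)]
      · rw [if_neg h1]
        show _ = (0 :: (alive ++ [n+1])).getD (i+1+1) 0
        rw [List.getD_eq_getElem?_getD, List.getElem?_cons_succ, List.getElem?_append,
          if_neg (by omega : ¬ i + 1 < alive.length)]
        congr 2 <;> omega

lemma extGet_insert (n : Int) (alive : List Int) (p : Nat) (hp : p ≤ alive.length) (d : Int)
    (i : Nat) :
    extGet n (alive.take p ++ d :: alive.drop p) i =
      if i ≤ p then extGet n alive i
      else if i = p + 1 then d
      else extGet n alive (i-1) := by
  have hlt : (alive.take p).length = p := by simp [hp]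
  have hll : (alive.take p ++ d :: alive.drop p).length = alive.length + 1 := by
    simp
  match i with
  | 0 => simp [extGet_zero]
  | Nat.succ i =>
    show (0 :: ((alive.take p ++ d :: alive.drop p) ++ [n+1])).getD (i+1) 0 = _
    rw [List.getD_eq_getElem?_getD, List.getElem?_cons_succ, List.getElem?_append, hll]
    by_cases hcase : i + 1 ≤ p
    · rw [if_pos hcase, if_pos (by omega : i < alive.length + 1),
        List.getElem?_append, if_pos (by omega : i < (alive.take p).length),
        List.getElem?_take, if_pos (by omega : i < p)]
      show _ = (0 :: (alive ++ [n+1])).getD (i+1) 0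
      rw [List.getD_eq_getElem?_getD, List.getElem?_cons_succ, List.getElem?_append,
        if_pos (by omega : i < alive.length)]
    · rw [if_neg hcase]
      by_cases h2 : i + 1 = p + 1
      · have hip : i = p := by omega
        subst hip
        rw [if_pos rfl, if_pos (by omega : i < alive.length + 1),
          List.getElem?_append, if_neg (by omega : ¬ i < (alive.take i).length), hlt]
        simp
      · rw [if_neg h2]
        obtain ⟨j, rfl⟩ : ∃ j, i = j + 1 := ⟨i - 1, by omega⟩
        by_cases h3 : j + 1 < alive.length + 1
        · rw [if_pos h3, List.getElem?_append,
            if_neg (by omega : ¬ j + 1 < (alive.take p).length), hlt,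
            show j + 1 - p = (j - p) + 1 by omega, List.getElem?_cons_succ, List.getElem?_drop]
          have hgoal : extGet n alive (j + 1 + 1 - 1) = alive[j]?.getD 0 := by
            show (0 :: (alive ++ [n+1])).getD (j+1) 0 = _
            rw [List.getD_eq_getElem?_getD, List.getElem?_cons_succ, List.getElem?_append,
              if_pos (by omega : j < alive.length)]
          rw [hgoal]
          congr 2
          omega
        · rw [if_neg h3]
          have hgoal : extGet n alive (j + 1 + 1 - 1) = [n+1][j - alive.length]?.getD 0 := by
            show (0 :: (alive ++ [n+1])).getD (j+1) 0 = _
            rw [List.getD_eq_getElem?_getD, List.getElem?_cons_succ, List.getElem?_append,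
              if_neg (by omega : ¬ j < alive.length)]
          rw [hgoal]
          congr 2
          omega

-- chain adjacency through the sorted rows
lemma iter_up (n : Int) (up down alive : List Int) (hch : chainOK n up down alive) :
    ∀ (j c : Nat), j ≤ c → c < alive.length →
    (fun k => PySem.List.pyGetD up k 0)^[j] (alive.getD c 0) = alive.getD (c - j) 0 := by
  intro j
  induction j with
  | zero => intro c _ _; simp
  | succ j ih =>
    intro c hj hc
    rw [Function.iterate_succ_apply]
    have hstep : PySem.List.pyGetD up (alive.getD c 0) 0 = alive.getD (c-1) 0 := by
      have h := (hch c (by omega)).2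
      rw [extGet_succ_of_lt n alive c hc] at h
      have e1 : alive.getD c 0 = alive[c] := List.getD_eq_getElem _ _ hc
      obtain ⟨c', rfl⟩ : ∃ c', c = c' + 1 := ⟨c - 1, by omega⟩
      rw [extGet_succ_of_lt n alive c' (by omega)] at h
      rw [e1, h, List.getD_eq_getElem _ _ (by omega : c' + 1 - 1 < alive.length)]
      simp
    rw [hstep, ih (c-1) (by omega) (by omega)]
    congr 1
    omega

lemma iter_down (n : Int) (up down alive : List Int) (hch : chainOK n up down alive) :
    ∀ (j c : Nat), c + j < alive.length →
    (fun k => PySem.List.pyGetD down k 0)^[j] (alive.getD c 0) = alive.getD (c + j) 0 := by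
  intro j
  induction j with
  | zero => intro c _; simp
  | succ j ih =>
    intro c hc
    rw [Function.iterate_succ_apply]
    have hstep : PySem.List.pyGetD down (alive.getD c 0) 0 = alive.getD (c+1) 0 := by
      have h := (hch (c+1) (by omega)).1
      rw [extGet_succ_of_lt n alive c (by omega), extGet_succ_of_lt n alive (c+1) (by omega)] at h
      rw [List.getD_eq_getElem _ _ (by omega : c < alive.length), h,
        List.getD_eq_getElem _ _ (by omega : c + 1 < alive.length)]
    rw [hstep, ih (c+1) (by omega)]
    congr 1
    omega

-- ---- insPos facts ----
lemma insPos_le_length (l : List Int) (d : Int) : insPos l d ≤ l.length := by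
  induction l with
  | nil => simp [insPos]
  | cons x xs ih => by_cases h : x < d <;> simp [insPos, h] <;> omega

lemma insPos_append (l1 l2 : List Int) (d : Int) (h1 : ∀ a ∈ l1, a < d)
    (h2 : ∀ a ∈ l2, ¬ a < d) : insPos (l1 ++ l2) d = l1.length := by
  induction l1 with
  | nil =>
    simp only [List.nil_append, List.length_nil]
    cases l2 with
    | nil => rfl
    | cons y ys => simp [insPos, h2 y (by simp)]
  | cons x xs ih =>
    simp [insPos, h1 x (by simp), ih (fun a ha => h1 a (by simp [ha]))]

lemma insPos_parts (l : List Int) (d : Int) (hs : l.Pairwise (· < ·)) (hd : d ∉ l) :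
    (∀ a ∈ l.take (insPos l d), a < d) ∧ (∀ a ∈ l.drop (insPos l d), d < a) := by
  induction l with
  | nil => simp
  | cons x xs ih =>
    rw [List.pairwise_cons] at hs
    by_cases h : x < d
    · simp only [insPos, if_pos h, List.take_succ_cons, List.drop_succ_cons]
      obtain ⟨ih1, ih2⟩ := ih hs.2 (fun hm => hd (by simp [hm]))
      exact ⟨fun a ha => by rcases List.mem_cons.1 ha with rfl | ha; exact h; exact ih1 a ha, ih2⟩
    · simp only [insPos, if_neg h, List.take_zero, List.drop_zero]
      refine ⟨by simp, fun a ha => ?_⟩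
      rcases List.mem_cons.1 ha with rfl | ha
      · have : d ≠ a := fun he => hd (by simp [he])
        omega
      · have := hs.1 a ha
        have : d ≠ x := fun he => hd (by simp [he])
        omega

lemma sorted_parts (alive : List Int) (hs : alive.Pairwise (· < ·)) (c : Nat)
    (hc : c < alive.length) :
    (∀ a ∈ alive.take c, a < alive[c]) ∧ (∀ a ∈ alive.drop (c+1), alive[c] < a) := by
  have hsplit : alive = alive.take c ++ alive[c] :: alive.drop (c+1) := by
    conv_lhs => rw [← List.take_append_drop c alive]
    congr 1
    rw [List.getElem_cons_drop]
  have hs2 : (alive.take c ++ alive[c] :: alive.drop (c+1)).Pairwise (· < ·) := by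
    rw [← hsplit]; exact hs
  rw [List.pairwise_append] at hs2
  obtain ⟨_, hcons, hcross⟩ := hs2
  rw [List.pairwise_cons] at hcons
  exact ⟨fun a ha => hcross a ha _ List.mem_cons_self, hcons.1⟩

-- ---- stack invariant facts ----
lemma mem_insert_of_mem (alive : List Int) (d a : Int) (h : a ∈ alive) :
    a ∈ PySem.List.insert alive (insPos alive d : Int) d := by
  rw [PySem.List.insert_natCast _ _ _ (insPos_le_length _ _)]
  rw [← List.take_append_drop (insPos alive d) alive] at h
  rcases List.mem_append.1 h with h | h
  · exact List.mem_append.2 (Or.inl h)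
  · exact List.mem_append.2 (Or.inr (by simp [h]))

lemma stkOK_mem (n : Int) (up down : List Int) (alive rest : List Int)
    (h : stkOK n up down alive rest) : ∀ d ∈ rest, (1 ≤ d ∧ d ≤ n) ∧ d ∉ alive := by
  induction rest generalizing alive with
  | nil => simp
  | cons d0 rest ih =>
    obtain ⟨h1, h2, h3, _, _, h6⟩ := h
    intro d hd
    rcases List.mem_cons.1 hd with rfl | hd
    · exact ⟨⟨h1, h2⟩, h3⟩
    · obtain ⟨hb, hm⟩ := ih _ h6 d hd
      exact ⟨hb, fun hmem => hm (mem_insert_of_mem _ _ _ hmem)⟩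

lemma stkOK_congr (n : Int) (up down up' down' : List Int) (alive rest : List Int)
    (h : ∀ d ∈ rest, PySem.List.pyGetD up' d 0 = PySem.List.pyGetD up d 0 ∧
         PySem.List.pyGetD down' d 0 = PySem.List.pyGetD down d 0)
    (hs : stkOK n up down alive rest) : stkOK n up' down' alive rest := by
  induction rest generalizing alive with
  | nil => trivial
  | cons d0 rest ih =>
    obtain ⟨h1, h2, h3, h4, h5, h6⟩ := hs
    obtain ⟨e1, e2⟩ := h d0 (by simp)
    exact ⟨h1, h2, h3, by rw [e1, h4], by rw [e2, h5],
      ih _ (fun d hd => h d (by simp [hd])) h6⟩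

-- ---- the chain after a delete ----
lemma chain_erase (n : Int) (up down alive : List Int) (hn : 0 ≤ n)
    (hs : alive.Pairwise (· < ·)) (hb : ∀ x ∈ alive, 1 ≤ x ∧ x ≤ n)
    (hlu : up.length = (n+2).toNat) (hld : down.length = (n+2).toNat)
    (hch : chainOK n up down alive) (c : Nat) (hc : c < alive.length) :
    chainOK n (PySem.List.pySetD up (extGet n alive (c+2)) (extGet n alive c))
              (PySem.List.pySetD down (extGet n alive c) (extGet n alive (c+2)))
              (alive.eraseIdx c) := by
  have hl : (alive.eraseIdx c).length = alive.length - 1 := by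
    rw [List.length_eraseIdx, if_pos hc]
  have hulen : ((up.length : Nat) : Int) = n + 2 := by
    rw [hlu]; exact Int.toNat_of_nonneg (by omega)
  have hdlen : ((down.length : Nat) : Int) = n + 2 := by
    rw [hld]; exact Int.toNat_of_nonneg (by omega)
  have hb2 := extGet_bounds n alive hn hb
  have hlt := extGet_lt n alive hn hs hb
  intro i hi
  rw [hl] at hi
  rw [extGet_eraseIdx n alive c hc i, extGet_eraseIdx n alive c hc (i+1)]
  by_cases h1 : i + 1 ≤ c
  · rw [if_pos (by omega : i ≤ c), if_pos h1]
    have hchold := hch i (by omega)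
    constructor
    · rw [getD_setD down _ _ _ _ (hb2 c (by omega)).1 (hb2 i (by omega)).1
        (by rw [hdlen]; have := (hb2 i (by omega)).2; omega),
        if_neg (ne_of_lt (hlt i c (by omega) (by omega)))]
      exact hchold.1
    · rw [getD_setD up _ _ _ _ (hb2 (c+2) (by omega)).1 (hb2 (i+1) (by omega)).1
        (by rw [hulen]; have := (hb2 (i+1) (by omega)).2; omega),
        if_neg (ne_of_lt (hlt (i+1) (c+2) (by omega) (by omega)))]
      exact hchold.2
  · by_cases h2 : i = c
    · subst h2
      rw [if_pos (le_refl i), if_neg (by omega : ¬ i + 1 ≤ i)]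
      constructor
      · rw [getD_setD down _ _ _ _ (hb2 i (by omega)).1 (hb2 i (by omega)).1
          (by rw [hdlen]; have := (hb2 i (by omega)).2; omega), if_pos rfl]
      · rw [getD_setD up _ _ _ _ (hb2 (i+2) (by omega)).1 (hb2 (i+1+1) (by omega)).1
          (by rw [hulen]; have := (hb2 (i+1+1) (by omega)).2; omega), if_pos rfl]
    · rw [if_neg (by omega : ¬ i ≤ c), if_neg (by omega : ¬ i + 1 ≤ c)]
      have hchold := hch (i+1) (by omega)
      constructor
      · rw [getD_setD down _ _ _ _ (hb2 c (by omega)).1 (hb2 (i+1) (by omega)).1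
          (by rw [hdlen]; have := (hb2 (i+1) (by omega)).2; omega),
          if_neg (ne_of_gt (hlt c (i+1) (by omega) (by omega)))]
        exact hchold.1
      · rw [getD_setD up _ _ _ _ (hb2 (c+2) (by omega)).1 (hb2 (i+1+1) (by omega)).1
          (by rw [hulen]; have := (hb2 (i+1+1) (by omega)).2; omega),
          if_neg (by
            have := hlt (c+2) (i+1+1) (by omega) (by omega)
            omega)]
        exact hchold.2

-- ---- the chain after a restore ----
lemma chain_insert (n : Int) (up down alive : List Int) (d : Int) (hn : 0 ≤ n)
    (hs : alive.Pairwise (· < ·)) (hb : ∀ x ∈ alive, 1 ≤ x ∧ x ≤ n)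
    (hd1 : 1 ≤ d) (hd2 : d ≤ n) (hd : d ∉ alive)
    (hlu : up.length = (n+2).toNat) (hld : down.length = (n+2).toNat)
    (hch : chainOK n up down alive)
    (hup : PySem.List.pyGetD up d 0 = extGet n alive (insPos alive d))
    (hdown : PySem.List.pyGetD down d 0 = extGet n alive (insPos alive d + 1)) :
    chainOK n (PySem.List.pySetD up (extGet n alive (insPos alive d + 1)) d)
              (PySem.List.pySetD down (extGet n alive (insPos alive d)) d)
              (alive.take (insPos alive d) ++ d :: alive.drop (insPos alive d)) := by
  have hpos : insPos alive d ≤ alive.length := insPos_le_length alive d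
  have hulen : ((up.length : Nat) : Int) = n + 2 := by
    rw [hlu]; exact Int.toNat_of_nonneg (by omega)
  have hdlen : ((down.length : Nat) : Int) = n + 2 := by
    rw [hld]; exact Int.toNat_of_nonneg (by omega)
  have hb2 := extGet_bounds n alive hn hb
  have hlt := extGet_lt n alive hn hs hb
  have hparts := insPos_parts alive d hs hd
  have hPd : extGet n alive (insPos alive d) < d := by
    cases hq : insPos alive d with
    | zero => rw [extGet_zero]; omega
    | succ q =>
      rw [extGet_succ_of_lt n alive q (by omega)]
      refine hparts.1 alive[q] ?_
      rw [hq]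
      have : (alive.take (q+1))[q]'(by simp; omega) = alive[q] := List.getElem_take
      rw [← this]
      exact List.getElem_mem _
  have hdS : d < extGet n alive (insPos alive d + 1) := by
    by_cases hq : insPos alive d < alive.length
    · rw [extGet_succ_of_lt n alive _ hq]
      refine hparts.2 alive[insPos alive d] ?_
      have : alive[insPos alive d] :: alive.drop (insPos alive d + 1) = alive.drop (insPos alive d) :=
        List.getElem_cons_drop _
      rw [← this]
      exact List.mem_cons_self
    · rw [show insPos alive d + 1 = alive.length + 1 by omega, extGet_last]
      omega
  have hll : (alive.take (insPos alive d) ++ d :: alive.drop (insPos alive d)).length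
      = alive.length + 1 := by simp
  intro i hi
  rw [hll] at hi
  rw [extGet_insert n alive _ hpos d i, extGet_insert n alive _ hpos d (i+1)]
  by_cases h1 : i + 1 ≤ insPos alive d
  · rw [if_pos (by omega : i ≤ insPos alive d), if_pos h1]
    have hchold := hch i (by omega)
    constructor
    · rw [getD_setD down _ _ _ _ (hb2 _ (by omega)).1 (hb2 i (by omega)).1
        (by rw [hdlen]; have := (hb2 i (by omega)).2; omega),
        if_neg (ne_of_lt (hlt i _ (by omega) (by omega)))]
      exact hchold.1
    · rw [getD_setD up _ _ _ _ (hb2 _ (by omega)).1 (hb2 (i+1) (by omega)).1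
        (by rw [hulen]; have := (hb2 (i+1) (by omega)).2; omega),
        if_neg (ne_of_lt (hlt (i+1) _ (by omega) (by omega)))]
      exact hchold.2
  · by_cases h2 : i = insPos alive d
    · subst h2
      rw [if_pos (le_refl _), if_neg (by omega : ¬ insPos alive d + 1 ≤ insPos alive d), if_pos rfl]
      constructor
      · rw [getD_setD down _ _ _ _ (hb2 (insPos alive d) (by omega)).1
          (hb2 (insPos alive d) (by omega)).1
          (by rw [hdlen]; have := (hb2 (insPos alive d) (by omega)).2; omega), if_pos rfl]
      · rw [getD_setD up _ _ _ _ (hb2 (insPos alive d + 1) (by omega)).1 (by omega : (0:Int) ≤ d)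
          (by rw [hulen]; omega),
          if_neg (by omega : ¬ d = extGet n alive (insPos alive d + 1))]
        exact hup
    · by_cases h3 : i = insPos alive d + 1
      · subst h3
        rw [if_neg (by omega : ¬ insPos alive d + 1 ≤ insPos alive d), if_pos rfl,
          if_neg (by omega : ¬ insPos alive d + 1 + 1 ≤ insPos alive d),
          if_neg (by omega : ¬ insPos alive d + 1 + 1 = insPos alive d + 1),
          show insPos alive d + 1 + 1 - 1 = insPos alive d + 1 from rfl]
        constructor
        · rw [getD_setD down _ _ _ _ (hb2 _ (by omega)).1 (by omega : (0:Int) ≤ d)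
            (by rw [hdlen]; omega), if_neg (by omega : ¬ d = extGet n alive (insPos alive d))]
          exact hdown
        · rw [getD_setD up _ _ _ _ (hb2 _ (by omega)).1 (hb2 _ (by omega)).1
            (by rw [hulen]; have := (hb2 (insPos alive d + 1) (by omega)).2; omega), if_pos rfl]
      · rw [if_neg (by omega : ¬ i ≤ insPos alive d), if_neg (by omega),
          if_neg (by omega : ¬ i + 1 ≤ insPos alive d), if_neg (by omega),
          show i + 1 - 1 = i from rfl]
        obtain ⟨j, rfl⟩ : ∃ j, i = j + 1 := ⟨i - 1, by omega⟩
        rw [show j + 1 - 1 = j from rfl]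
        have hchold := hch j (by omega)
        constructor
        · rw [getD_setD down _ _ _ _ (hb2 _ (by omega)).1 (hb2 j (by omega)).1
            (by rw [hdlen]; have := (hb2 j (by omega)).2; omega),
            if_neg (ne_of_gt (hlt _ j (by omega) (by omega)))]
          exact hchold.1
        · rw [getD_setD up _ _ _ _ (hb2 _ (by omega)).1 (hb2 (j+1) (by omega)).1
            (by rw [hulen]; have := (hb2 (j+1) (by omega)).2; omega),
            if_neg (ne_of_gt (hlt _ (j+1) (by omega) (by omega)))]
          exact hchold.2

lemma step_good (n : Int) (c : String)
    (sA : List Int × List Int × List Int × Int) (sB sB' : List Int × Int × List Int)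
    (hok : okStep c sB = some sB') (hg : Good n sA sB) :
    solBStep sB c = sB' ∧ Good n (solAStep n sA c) (solBStep sB c) := by
  obtain ⟨del, up, down, kA⟩ := sA
  obtain ⟨alive, cur, stk⟩ := sB
  obtain ⟨hdel, hlu, hld, hsrt, hbnd, hcur0, hcurlt, hkA, hch, hstk⟩ := hg
  dsimp only at hdel hlu hld hsrt hbnd hcur0 hcurlt hkA hch hstk
  have hn1 : 1 ≤ n := by
    rcases alive with _ | ⟨x, t⟩
    · simp at hcurlt; omega
    · have := hbnd x (by simp); omega
  have hn0 : (0:Int) ≤ n := by omega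
  have hcN : ((cur.toNat : Nat) : Int) = cur := Int.toNat_of_nonneg hcur0
  have hcNlt : cur.toNat < alive.length := by omega
  have hkA' : kA = alive[cur.toNat] := by
    rw [← hkA, PySem.List.pyGetD_eq_getElem alive 0 hcur0 hcurlt]
  by_cases hC : (c == "C") = true
  · -- ===== delete =====
    simp only [okStep, hC, if_true] at hok
    by_cases hguard : 2 ≤ alive.length ∧ 0 ≤ cur ∧ cur < (alive.length : Int)
    case neg => rw [if_neg hguard] at hok; exact absurd hok (by simp)
    rw [if_pos hguard, Option.some.injEq] at hok
    have hlen2 : 2 ≤ alive.length := hguard.1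
    have hb2 := extGet_bounds n alive hn0 hbnd
    have hlt := extGet_lt n alive hn0 hsrt hbnd
    have hulen : ((up.length : Nat) : Int) = n + 2 := by
      rw [hlu]; exact Int.toNat_of_nonneg (by omega)
    have hdlen : ((down.length : Nat) : Int) = n + 2 := by
      rw [hld]; exact Int.toNat_of_nonneg (by omega)
    have hkb : 1 ≤ alive[cur.toNat] ∧ alive[cur.toNat] ≤ n := hbnd _ (List.getElem_mem _)
    have hkext : kA = extGet n alive (cur.toNat + 1) := by
      rw [extGet_succ_of_lt n alive cur.toNat hcNlt, hkA']
    have hup_kA : PySem.List.pyGetD up kA 0 = extGet n alive cur.toNat := by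
      have h := (hch cur.toNat (by omega)).2
      rw [← hkext] at h
      exact h
    have hdown_kA : PySem.List.pyGetD down kA 0 = extGet n alive (cur.toNat + 2) := by
      have h := (hch (cur.toNat + 1) (by omega)).1
      rw [← hkext] at h
      exact h
    have hup1_kA : PySem.List.pyGetD
        (PySem.List.pySetD up (extGet n alive (cur.toNat + 2)) (extGet n alive cur.toNat)) kA 0
        = extGet n alive cur.toNat := by
      rw [getD_setD up _ kA _ 0 (hb2 _ (by omega)).1 (by omega : (0:Int) ≤ kA)
        (by rw [hulen]; omega : kA < ((up.length : Nat) : Int)),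
        if_neg (by
          rw [hkext]
          exact ne_of_lt (hlt (cur.toNat+1) (cur.toNat+2) (by omega) (by omega))),
        hup_kA]
    have hdown1_kA : PySem.List.pyGetD
        (PySem.List.pySetD down (extGet n alive cur.toNat) (extGet n alive (cur.toNat + 2))) kA 0
        = extGet n alive (cur.toNat + 2) := by
      rw [getD_setD down _ kA _ 0 (hb2 _ (by omega)).1 (by omega : (0:Int) ≤ kA)
        (by rw [hdlen]; omega : kA < ((down.length : Nat) : Int)),
        if_neg (by
          rw [hkext]
          exact (ne_of_lt (hlt cur.toNat (cur.toNat+1) (by omega) (by omega))).symm),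
        hdown_kA]
    have hpop : PySem.List.pop? alive cur = some (alive[cur.toNat], alive.eraseIdx cur.toNat) := by
      have h := PySem.List.pop?_natCast alive cur.toNat hcNlt
      rwa [hcN] at h
    have hlenE : ((alive.eraseIdx cur.toNat).length : Int) = (alive.length : Int) - 1 := by
      rw [List.length_eraseIdx, if_pos hcNlt]; omega
    have hparts := sorted_parts alive hsrt cur.toNat hcNlt
    have hnotmem : alive[cur.toNat] ∉ alive.eraseIdx cur.toNat := by
      intro hmem
      rw [List.eraseIdx_eq_take_drop_succ] at hmem
      rcases List.mem_append.1 hmem with h | h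
      · exact absurd (hparts.1 _ h) (lt_irrefl _)
      · exact absurd (hparts.2 _ h) (lt_irrefl _)
    have hInsPos : insPos (alive.eraseIdx cur.toNat) alive[cur.toNat] = cur.toNat := by
      rw [List.eraseIdx_eq_take_drop_succ,
        insPos_append _ _ _ hparts.1 (fun a ha => not_lt.mpr (le_of_lt (hparts.2 a ha))),
        List.length_take]
      omega
    have hreassemble : PySem.List.insert (alive.eraseIdx cur.toNat) (cur.toNat : Int)
        alive[cur.toNat] = alive := by
      rw [PySem.List.insert_natCast _ _ _ (by omega : cur.toNat ≤ (alive.eraseIdx cur.toNat).length)]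
      have ht : (alive.eraseIdx cur.toNat).take cur.toNat = alive.take cur.toNat := by
        rw [List.eraseIdx_eq_take_drop_succ, List.take_append, List.take_take, List.length_take]
        simp [Nat.min_self, show min cur.toNat alive.length = cur.toNat by omega]
      have hd : (alive.eraseIdx cur.toNat).drop cur.toNat = alive.drop (cur.toNat + 1) := by
        rw [List.eraseIdx_eq_take_drop_succ, List.drop_append, List.length_take]
        have : (alive.take cur.toNat).drop cur.toNat = [] := by
          rw [List.drop_eq_nil_iff]
          simp
        rw [this]
        simp [show cur.toNat - min cur.toNat alive.length = 0 by omega]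
      rw [ht, hd, List.getElem_cons_drop, List.take_append_drop]
    have hstk' : stkOK n
        (PySem.List.pySetD up (extGet n alive (cur.toNat + 2)) (extGet n alive cur.toNat))
        (PySem.List.pySetD down (extGet n alive cur.toNat) (extGet n alive (cur.toNat + 2)))
        alive stk.reverse := by
      refine stkOK_congr n up down _ _ alive stk.reverse (fun d hd => ?_) hstk
      obtain ⟨⟨hd1, hd2⟩, hdmem⟩ := stkOK_mem n up down alive stk.reverse hstk d hd
      have hdne_s : d ≠ extGet n alive (cur.toNat + 2) := by
        by_cases hcase : cur.toNat + 2 < alive.length + 1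
        · intro he
          exact hdmem (he ▸ extGet_mem n alive _ (by omega) hcase)
        · have he2 : cur.toNat + 2 = alive.length + 1 := by omega
          rw [he2, extGet_last]
          intro he
          omega
      have hdne_p : d ≠ extGet n alive cur.toNat := by
        cases hq : cur.toNat with
        | zero => rw [extGet_zero]; intro he; omega
        | succ q =>
          intro he
          exact hdmem (he ▸ extGet_mem n alive _ (by omega) (by omega))
      constructor
      · rw [getD_setD up _ d _ 0 (hb2 _ (by omega)).1 (by omega : (0:Int) ≤ d)
          (by rw [hulen]; omega), if_neg hdne_s]
      · rw [getD_setD down _ d _ 0 (hb2 _ (by omega)).1 (by omega : (0:Int) ≤ d)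
          (by rw [hdlen]; omega), if_neg hdne_p]
    have hBval : solBStep (alive, cur, stk) c
        = (alive.eraseIdx cur.toNat,
           (if cur = ((alive.eraseIdx cur.toNat).length : Int) then cur - 1 else cur),
           stk ++ [alive.getD cur.toNat 0]) := by
      simp only [solBStep, hC, if_true, hpop]
      rw [List.getD_eq_getElem _ _ hcNlt]
      by_cases hcase : cur = ((alive.eraseIdx cur.toNat).length : Int)
      · rw [if_pos hcase, if_pos (by rw [beq_iff_eq]; exact hcase)]
      · rw [if_neg hcase, if_neg (by rw [beq_iff_eq]; exact hcase)]
    refine ⟨by rw [hBval, hok], ?_⟩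
    rw [hBval]
    simp only [solAStep, hC, if_true, hup_kA, hdown_kA, hup1_kA, hdown1_kA]
    by_cases hlast : cur.toNat + 1 < alive.length
    · -- deleted row was not the last one: cursor stays, successor row moves under it
      have hs_le : extGet n alive (cur.toNat + 2) ≤ n := by
        rw [extGet_succ_of_lt n alive (cur.toNat + 1) hlast]
        exact (hbnd _ (List.getElem_mem _)).2
      rw [if_neg (by omega : ¬ extGet n alive (cur.toNat + 2) > n)]
      rw [if_neg (by omega : ¬ cur = ((alive.eraseIdx cur.toNat).length : Int))]
      refine ⟨by dsimp only; rw [hdel, hkA', List.getD_eq_getElem _ _ hcNlt],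
        by simp [PySem.List.length_pySetD, hlu],
        by simp [PySem.List.length_pySetD, hld],
        hsrt.sublist (List.eraseIdx_sublist _ _),
        fun x hx => hbnd x (List.Sublist.mem hx (List.eraseIdx_sublist _ _)),
        by dsimp only; omega, by dsimp only; omega, ?_,
        chain_erase n up down alive hn0 hsrt hbnd hlu hld hch cur.toNat hcNlt, ?_⟩
      · dsimp only
        rw [PySem.List.pyGetD_eq_getElem _ 0 hcur0 (by omega),
          List.getElem_eraseIdx, dif_neg (by omega : ¬ cur.toNat < cur.toNat),
          extGet_succ_of_lt n alive (cur.toNat + 1) hlast]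
      · dsimp only
        rw [List.getD_eq_getElem _ _ hcNlt, List.reverse_append, List.reverse_singleton,
          List.singleton_append]
        refine ⟨hkb.1, hkb.2, hnotmem, ?_, ?_, ?_⟩
        · rw [hInsPos, ← hkA', hup1_kA,
            extGet_eraseIdx n alive cur.toNat hcNlt, if_pos (le_refl _)]
        · rw [hInsPos, ← hkA', hdown1_kA,
            extGet_eraseIdx n alive cur.toNat hcNlt, if_neg (by omega)]
        · rw [hInsPos, hreassemble]
          exact hstk'
    · -- deleted row was the last one: cursor moves up
      have hce : cur.toNat + 1 = alive.length := by omega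
      have hs_gt : extGet n alive (cur.toNat + 2) = n + 1 := by
        rw [show cur.toNat + 2 = alive.length + 1 by omega, extGet_last]
      rw [if_pos (by rw [hs_gt]; omega : extGet n alive (cur.toNat + 2) > n)]
      rw [if_pos (by omega : cur = ((alive.eraseIdx cur.toNat).length : Int))]
      have hc1 : 1 ≤ cur.toNat := by omega
      refine ⟨by dsimp only; rw [hdel, hkA', List.getD_eq_getElem _ _ hcNlt],
        by simp [PySem.List.length_pySetD, hlu],
        by simp [PySem.List.length_pySetD, hld],
        hsrt.sublist (List.eraseIdx_sublist _ _),
        fun x hx => hbnd x (List.Sublist.mem hx (List.eraseIdx_sublist _ _)),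
        by dsimp only; omega, by dsimp only; omega, ?_,
        chain_erase n up down alive hn0 hsrt hbnd hlu hld hch cur.toNat hcNlt, ?_⟩
      · dsimp only
        rw [PySem.List.pyGetD_eq_getElem _ 0 (by omega) (by omega),
          List.getElem_eraseIdx, dif_pos (by omega : (cur - 1).toNat < cur.toNat)]
        have e : extGet n alive cur.toNat = alive[(cur - 1).toNat]'(by omega) := by
          obtain ⟨q, hq⟩ : ∃ q, cur.toNat = q + 1 := ⟨cur.toNat - 1, by omega⟩
          rw [hq, extGet_succ_of_lt n alive q (by omega)]
          congr 1
          omega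
        exact e.symm
      · dsimp only
        rw [List.getD_eq_getElem _ _ hcNlt, List.reverse_append, List.reverse_singleton,
          List.singleton_append]
        refine ⟨hkb.1, hkb.2, hnotmem, ?_, ?_, ?_⟩
        · rw [hInsPos, ← hkA', hup1_kA,
            extGet_eraseIdx n alive cur.toNat hcNlt, if_pos (le_refl _)]
        · rw [hInsPos, ← hkA', hdown1_kA,
            extGet_eraseIdx n alive cur.toNat hcNlt, if_neg (by omega)]
        · rw [hInsPos, hreassemble]
          exact hstk'
  · by_cases hZ : (c == "Z") = true
    · -- ===== restore =====
      simp only [okStep, hC, hZ, if_true, Bool.false_eq_true, if_false] at hok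
      rw [Bool.not_eq_true] at hC
      have hstkne : stk ≠ [] := by
        intro he
        subst he
        exact absurd hok (by simp)
      obtain ⟨ys, y, rfl⟩ := (List.eq_nil_or_concat stk).resolve_left hstkne
      simp only [List.concat_eq_append] at hdel hstk hok ⊢
      rw [show (ys ++ [y]).reverse = y :: ys.reverse by simp] at hok
      simp only [List.reverse_reverse, Option.some.injEq] at hok
      have hb2 := extGet_bounds n alive hn0 hbnd
      have hlt := extGet_lt n alive hn0 hsrt hbnd
      have hulen : ((up.length : Nat) : Int) = n + 2 := by
        rw [hlu]; exact Int.toNat_of_nonneg (by omega)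
      have hdlen : ((down.length : Nat) : Int) = n + 2 := by
        rw [hld]; exact Int.toNat_of_nonneg (by omega)
      rw [show (ys ++ [y]).reverse = y :: ys.reverse by simp] at hstk
      obtain ⟨hy1, hy2, hymem, hyup, hydown, hrest⟩ := hstk
      have hkext : kA = extGet n alive (cur.toNat + 1) := by
        rw [extGet_succ_of_lt n alive cur.toNat hcNlt, hkA']
      have hposle : insPos alive y ≤ alive.length := insPos_le_length alive y
      have hparts := insPos_parts alive y hsrt hymem
      have hPd : extGet n alive (insPos alive y) < y := by
        cases hq : insPos alive y with
        | zero => rw [extGet_zero]; omega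
        | succ q =>
          rw [extGet_succ_of_lt n alive q (by omega)]
          refine hparts.1 alive[q] ?_
          rw [hq]
          have e : (alive.take (q+1))[q]'(by simp; omega) = alive[q] := List.getElem_take
          rw [← e]
          exact List.getElem_mem _
      have hdS : y < extGet n alive (insPos alive y + 1) := by
        by_cases hq : insPos alive y < alive.length
        · rw [extGet_succ_of_lt n alive _ hq]
          refine hparts.2 alive[insPos alive y] ?_
          have e : alive[insPos alive y] :: alive.drop (insPos alive y + 1)
              = alive.drop (insPos alive y) := List.getElem_cons_drop _
          rw [← e]
          exact List.mem_cons_self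
        · rw [show insPos alive y + 1 = alive.length + 1 by omega, extGet_last]
          omega
      have hpopS : PySem.List.pop? (ys ++ [y]) (-1) = some (y, ys) := PySem.List.pop?_last ys y
      have hup1y : PySem.List.pyGetD
          (PySem.List.pySetD up (extGet n alive (insPos alive y + 1)) y) y 0
          = extGet n alive (insPos alive y) := by
        rw [getD_setD up _ y _ 0 (hb2 _ (by omega)).1 (by omega : (0:Int) ≤ y)
          (by rw [hulen]; omega), if_neg (ne_of_lt hdS), hyup]
      have halive' : PySem.List.insert alive ((insPos alive y : Nat) : Int) y
          = alive.take (insPos alive y) ++ y :: alive.drop (insPos alive y) :=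
        PySem.List.insert_natCast _ _ _ hposle
      have hsub : ∀ z ∈ alive, z ∈ alive.take (insPos alive y) ++ y :: alive.drop (insPos alive y) := by
        intro z hz
        rw [← halive']
        exact mem_insert_of_mem alive y z hz
      rw [halive'] at hrest
      have hllNat : (alive.take (insPos alive y) ++ y :: alive.drop (insPos alive y)).length
          = alive.length + 1 := by simp
      have hllInt : ((alive.take (insPos alive y) ++ y :: alive.drop (insPos alive y)).length : Int)
          = (alive.length : Int) + 1 := by rw [hllNat]; push_cast; ring
      have hsrt' : (alive.take (insPos alive y) ++ y :: alive.drop (insPos alive y)).Pairwise (· < ·) := by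
        have hs2 : (alive.take (insPos alive y) ++ alive.drop (insPos alive y)).Pairwise (· < ·) := by
          rw [List.take_append_drop]; exact hsrt
        rw [List.pairwise_append] at hs2
        refine List.pairwise_append.mpr
          ⟨hs2.1, List.Pairwise.cons (fun b hb' => hparts.2 b hb') hs2.2.1, ?_⟩
        intro a ha b hb'
        rcases List.mem_cons.1 hb' with rfl | hb'
        · exact hparts.1 a ha
        · exact hs2.2.2 a ha b hb'
      have hbnd' : ∀ x ∈ alive.take (insPos alive y) ++ y :: alive.drop (insPos alive y),
          1 ≤ x ∧ x ≤ n := by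
        intro x hx
        rcases List.mem_append.1 hx with h | h
        · exact hbnd x (List.take_subset _ _ h)
        · rcases List.mem_cons.1 h with rfl | h
          · exact ⟨hy1, hy2⟩
          · exact hbnd x (List.drop_subset _ _ h)
      have hstk'' : stkOK n
          (PySem.List.pySetD up (extGet n alive (insPos alive y + 1)) y)
          (PySem.List.pySetD down (extGet n alive (insPos alive y)) y)
          (alive.take (insPos alive y) ++ y :: alive.drop (insPos alive y)) ys.reverse := by
        refine stkOK_congr n up down _ _ _ ys.reverse (fun d hd => ?_) hrest
        obtain ⟨⟨hd1, hd2⟩, hdmem⟩ := stkOK_mem n up down _ ys.reverse hrest d hd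
        have hdalive : d ∉ alive := fun hmem => hdmem (hsub d hmem)
        have hdne_S : d ≠ extGet n alive (insPos alive y + 1) := by
          by_cases hcase : insPos alive y + 1 < alive.length + 1
          · intro he
            exact hdalive (he ▸ extGet_mem n alive _ (by omega) hcase)
          · rw [show insPos alive y + 1 = alive.length + 1 by omega, extGet_last]
            intro he
            omega
        have hdne_P : d ≠ extGet n alive (insPos alive y) := by
          cases hq : insPos alive y with
          | zero => rw [extGet_zero]; intro he; omega
          | succ q =>
            intro he
            exact hdalive (he ▸ extGet_mem n alive _ (by omega) (by omega))
        constructor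
        · rw [getD_setD up _ d _ 0 (hb2 _ (by omega)).1 (by omega : (0:Int) ≤ d)
            (by rw [hulen]; omega), if_neg hdne_S]
        · rw [getD_setD down _ d _ 0 (hb2 _ (by omega)).1 (by omega : (0:Int) ≤ d)
            (by rw [hdlen]; omega), if_neg hdne_P]
      have hBval : solBStep (alive, cur, ys ++ [y]) c
          = (alive.take (insPos alive y) ++ y :: alive.drop (insPos alive y),
             (if ((insPos alive y : Nat) : Int) ≤ cur then cur + 1 else cur), ys) := by
        simp only [solBStep, hC, hZ, Bool.false_eq_true, if_false, if_true, hpopS, halive']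
      refine ⟨by rw [hBval, ← hok], ?_⟩
      rw [hBval]
      simp only [solAStep, hC, hZ, Bool.false_eq_true, if_false, if_true, hdel, hpopS, hydown, hup1y]
      by_cases hple : ((insPos alive y : Nat) : Int) ≤ cur
      · rw [if_pos hple]
        have hpleN : insPos alive y ≤ cur.toNat := by omega
        refine ⟨rfl, by simp [PySem.List.length_pySetD, hlu],
          by simp [PySem.List.length_pySetD, hld], hsrt', hbnd',
          by dsimp only; omega, by dsimp only; rw [hllInt]; omega, ?_,
          chain_insert n up down alive y hn0 hsrt hbnd hy1 hy2 hymem hlu hld hch hyup hydown,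
          hstk''⟩
        dsimp only
        rw [PySem.List.pyGetD_eq_getElem _ 0 (by omega) (by rw [hllInt]; omega)]
        have e2 : extGet n (alive.take (insPos alive y) ++ y :: alive.drop (insPos alive y))
            (cur.toNat + 2) = extGet n alive (cur.toNat + 1) := by
          rw [extGet_insert n alive _ hposle y (cur.toNat+2),
            if_neg (by omega : ¬ cur.toNat + 2 ≤ insPos alive y),
            if_neg (by omega : ¬ cur.toNat + 2 = insPos alive y + 1)]
          congr 1
        have e1 : (alive.take (insPos alive y) ++ y :: alive.drop (insPos alive y))[(cur + 1).toNat]'(by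
                rw [hllNat]; omega) = extGet n alive (cur.toNat + 1) := by
          rw [← e2, show cur.toNat + 2 = (cur.toNat + 1) + 1 from rfl,
            extGet_succ_of_lt n _ (cur.toNat+1) (by rw [hllNat]; omega)]
          congr 1
          omega
        rw [e1, ← hkext]
      · rw [if_neg hple]
        have hpgtN : cur.toNat < insPos alive y := by omega
        refine ⟨rfl, by simp [PySem.List.length_pySetD, hlu],
          by simp [PySem.List.length_pySetD, hld], hsrt', hbnd',
          by dsimp only; omega, by dsimp only; rw [hllInt]; omega, ?_,
          chain_insert n up down alive y hn0 hsrt hbnd hy1 hy2 hymem hlu hld hch hyup hydown,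
          hstk''⟩
        dsimp only
        rw [PySem.List.pyGetD_eq_getElem _ 0 (by omega) (by rw [hllInt]; omega)]
        have e2 : extGet n (alive.take (insPos alive y) ++ y :: alive.drop (insPos alive y))
            (cur.toNat + 1) = extGet n alive (cur.toNat + 1) := by
          rw [extGet_insert n alive _ hposle y (cur.toNat+1),
            if_pos (by omega : cur.toNat + 1 ≤ insPos alive y)]
        have e1 : (alive.take (insPos alive y) ++ y :: alive.drop (insPos alive y))[cur.toNat]'(by
                rw [hllNat]; omega) = extGet n alive (cur.toNat + 1) := by
          rw [← e2, extGet_succ_of_lt n _ cur.toNat (by rw [hllNat]; omega)]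
        rw [e1, ← hkext]
    · -- ===== move =====
      simp only [okStep, hC, hZ, Bool.false_eq_true, if_false] at hok
      cases hmv : moveOk c with
      | none => rw [hmv] at hok; exact absurd hok (by simp)
      | some pv =>
        obtain ⟨isU, v⟩ := pv
        rw [hmv] at hok
        obtain ⟨dir, num, hsplit, hnum, hisU⟩ :
            ∃ dir num, PySem.Str.split₀ c = [dir, num] ∧ PySem.Int.ofStr? num = some v ∧
              isU = (dir == "U") := by
          unfold moveOk at hmv
          cases hs2 : PySem.Str.split₀ c with
          | nil => rw [hs2] at hmv; simp at hmv
          | cons d0 rest =>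
            cases rest with
            | nil => rw [hs2] at hmv; simp at hmv
            | cons n0 rest2 =>
              cases rest2 with
              | nil =>
                rw [hs2] at hmv
                dsimp only at hmv
                cases ho : PySem.Int.ofStr? n0 with
                | none => rw [ho] at hmv; simp at hmv
                | some v0 =>
                  rw [ho] at hmv
                  dsimp only at hmv
                  rw [Option.some.injEq, Prod.mk.injEq] at hmv
                  exact ⟨d0, n0, rfl, by rw [ho, hmv.2], hmv.1.symm⟩
              | cons _ _ => rw [hs2] at hmv; simp at hmv
        rw [Bool.not_eq_true] at hC hZ
        by_cases hU : (dir == "U") = true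
        · rw [hU] at hisU
          subst hisU
          dsimp only at hok
          by_cases hvg : 0 ≤ v ∧ v ≤ cur
          case neg => rw [if_neg hvg] at hok; exact absurd hok (by simp)
          rw [if_pos hvg, Option.some.injEq] at hok
          have hv0 : 0 ≤ v := hvg.1
          have hvc : v ≤ cur := hvg.2
          have hBval : solBStep (alive, cur, stk) c = (alive, cur - v, stk) := by
            simp only [solBStep, hC, hZ, Bool.false_eq_true, if_false, hsplit, hnum, hU, if_true]
          refine ⟨by rw [hBval, ← hok], ?_⟩
          rw [hBval]
          simp only [solAStep, hC, hZ, hsplit, hnum, hU, Bool.false_eq_true,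
            if_false, if_true]
          have hiter : (PySem.List.pyRange 0 v 1).foldl (fun k _ => PySem.List.pyGetD up k 0) kA
              = alive.getD (cur.toNat - v.toNat) 0 := by
            rw [List.foldl_const, PySem.List.length_pyRange_one]
            have hkg : kA = alive.getD cur.toNat 0 := by
              rw [hkA', List.getD_eq_getElem _ _ hcNlt]
            rw [hkg, show (v - 0).toNat = v.toNat by omega]
            exact iter_up n up down alive hch v.toNat cur.toNat (by omega) hcNlt
          refine ⟨hdel, hlu, hld, hsrt, hbnd, by dsimp only; omega, by dsimp only; omega, ?_,
            hch, hstk⟩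
          dsimp only
          rw [hiter, List.getD_eq_getElem _ _ (by omega),
            PySem.List.pyGetD_eq_getElem alive 0 (by omega) (by omega)]
          congr 1
          omega
        · rw [Bool.not_eq_true] at hU
          rw [hU] at hisU
          subst hisU
          dsimp only at hok
          by_cases hvg : 0 ≤ v ∧ cur + v ≤ (alive.length : Int) - 1
          case neg => rw [if_neg hvg] at hok; exact absurd hok (by simp)
          rw [if_pos hvg, Option.some.injEq] at hok
          have hv0 : 0 ≤ v := hvg.1
          have hvc : cur + v ≤ (alive.length : Int) - 1 := hvg.2
          have hBval : solBStep (alive, cur, stk) c = (alive, cur + v, stk) := by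
            simp only [solBStep, hC, hZ, Bool.false_eq_true, if_false, hsplit, hnum, hU]
          refine ⟨by rw [hBval, ← hok], ?_⟩
          rw [hBval]
          simp only [solAStep, hC, hZ, hsplit, hnum, hU, Bool.false_eq_true,
            if_false, if_true]
          have hiter : (PySem.List.pyRange 0 v 1).foldl (fun k _ => PySem.List.pyGetD down k 0) kA
              = alive.getD (cur.toNat + v.toNat) 0 := by
            rw [List.foldl_const, PySem.List.length_pyRange_one]
            have hkg : kA = alive.getD cur.toNat 0 := by
              rw [hkA', List.getD_eq_getElem _ _ hcNlt]
            rw [hkg, show (v - 0).toNat = v.toNat by omega]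
            exact iter_down n up down alive hch v.toNat cur.toNat (by omega)
          refine ⟨hdel, hlu, hld, hsrt, hbnd, by dsimp only; omega, by dsimp only; omega, ?_,
            hch, hstk⟩
          dsimp only
          rw [hiter, List.getD_eq_getElem _ _ (by omega),
            PySem.List.pyGetD_eq_getElem alive 0 (by omega) (by omega)]
          congr 1
          omega

lemma foldl_bind_none_chk (cmd : List String) :
    cmd.foldl (fun (s : Option (List Int × Int × List Int)) c => s.bind (okStep c)) none = none := by
  induction cmd with
  | nil => rfl
  | cons c cmd ih => simpa using ih

lemma main_inv (n : Int) (cmd : List String) : ∀ (sA : List Int × List Int × List Int × Int)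
    (sB : List Int × Int × List Int),
    Good n sA sB →
    (cmd.foldl (fun s c => s.bind (okStep c)) (some sB)).isSome = true →
    (cmd.foldl (solAStep n) sA).1 = (cmd.foldl solBStep sB).2.2 := by
  induction cmd with
  | nil =>
    intro sA sB hg _
    exact hg.1
  | cons c cmd ih =>
    intro sA sB hg hfold
    simp only [List.foldl_cons] at hfold ⊢
    cases hok : okStep c sB with
    | none =>
      rw [show (some sB).bind (okStep c) = none by simp [hok], foldl_bind_none_chk] at hfold
      simp at hfold
    | some sB' =>
      rw [show (some sB).bind (okStep c) = some sB' by simp [hok]] at hfold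
      obtain ⟨hb, hgood⟩ := step_good n c sA sB sB' hok hg
      rw [← hb] at hfold
      exact ih _ _ hgood hfold

lemma init_good (n k : Int) (h1 : 1 ≤ n) (h2 : 0 ≤ k) (h3 : k ≤ n - 1) :
    Good n
      (([] : List Int), (PySem.List.pyRange 0 (n+2) 1).map (fun i => i - 1),
        (PySem.List.pyRange 0 (n+2) 1).map (fun i => i + 1), k + 1)
      (PySem.List.pyRange 1 (n+1) 1, k, ([] : List Int)) := by
  have hlenN : (PySem.List.pyRange 1 (n+1) 1).length = (n - 1 + 1).toNat := by
    rw [PySem.List.length_pyRange_one]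
    congr 1
    ring
  have hlen0 : ((PySem.List.pyRange 1 (n+1) 1).length : Int) = n := by
    rw [hlenN]; omega
  have hext : ∀ j : Nat, j < (PySem.List.pyRange 1 (n+1) 1).length + 2 →
      extGet n (PySem.List.pyRange 1 (n+1) 1) j = (j : Int) := by
    intro j hj
    match j with
    | 0 => rw [extGet_zero]; rfl
    | Nat.succ j =>
      by_cases hc : j < (PySem.List.pyRange 1 (n+1) 1).length
      · rw [Nat.succ_eq_add_one, extGet_succ_of_lt n _ j hc,
          PySem.List.getElem_pyRange_one 1 (n+1) j hc]
        push_cast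
        ring
      · rw [show j.succ = (PySem.List.pyRange 1 (n+1) 1).length + 1 by omega, extGet_last]
        rw [hlenN]
        push_cast
        omega
  refine ⟨rfl, by rw [List.length_map, PySem.List.length_pyRange_one]; norm_num,
    by rw [List.length_map, PySem.List.length_pyRange_one]; norm_num,
    PySem.List.pairwise_lt_pyRange_one 1 (n+1),
    fun x hx => by rw [PySem.List.mem_pyRange_one] at hx; omega,
    h2, by dsimp only; rw [hlen0]; omega, ?_, ?_, trivial⟩
  · dsimp only
    rw [PySem.List.pyGetD_eq_getElem _ 0 h2 (by rw [hlen0]; omega),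
      PySem.List.getElem_pyRange_one 1 (n+1) k.toNat (by omega)]
    omega
  · intro i hi
    rw [hlenN] at hi
    constructor
    · rw [hext i (by rw [hlenN]; omega), hext (i+1) (by rw [hlenN]; omega),
        PySem.List.pyGetD_map_pyRange_of_nonneg _ (n+2) (i : Int) 0 (by omega) (by omega)]
      push_cast
      ring
    · rw [hext i (by rw [hlenN]; omega), hext (i+1) (by rw [hlenN]; omega),
        PySem.List.pyGetD_map_pyRange_of_nonneg _ (n+2) ((i+1 : Nat) : Int) 0 (by omega)
          (by push_cast; omega)]
      push_cast
      ring

lemma foldl_bind_none_walk (n : Int) (cmd : List String) :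
    cmd.foldl (fun (s : Option Int) c => s.bind (fun t => walkOk n t c)) none = none := by
  induction cmd with
  | nil => rfl
  | cons c cmd ih => simpa using ih

lemma walk_all_moves (n : Int) (cmd : List String) : ∀ t : Int,
    (cmd.foldl (fun s c => s.bind (fun t => walkOk n t c)) (some t)).isSome = true →
    ∀ c ∈ cmd, (c == "C") = false ∧ (c == "Z") = false := by
  induction cmd with
  | nil => intro t _ c hc; simp at hc
  | cons c0 cmd ih =>
    intro t hfold c hc
    rw [List.foldl_cons] at hfold
    cases hw : walkOk n t c0 with
    | none =>
      rw [show (some t).bind (fun t => walkOk n t c0) = none by simp [hw],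
        foldl_bind_none_walk] at hfold
      simp at hfold
    | some t' =>
      have hcz : ((c0 == "C") || (c0 == "Z")) = false := by
        by_contra hcon
        rw [Bool.not_eq_false] at hcon
        unfold walkOk at hw
        rw [hcon] at hw
        simp at hw
      rw [Bool.or_eq_false_iff] at hcz
      rcases List.mem_cons.1 hc with rfl | hc
      · exact hcz
      · refine ih t' ?_ c hc
        rwa [show (some t).bind (fun t => walkOk n t c0) = some t' by simp [hw]] at hfold

lemma solAStep_keep (n : Int) (s : List Int × List Int × List Int × Int) (c : String)
    (h : (c == "C") = false ∧ (c == "Z") = false) : (solAStep n s c).1 = s.1 := by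
  obtain ⟨del, up, down, k⟩ := s
  simp only [solAStep, h.1, h.2, Bool.false_eq_true, if_false]
  repeat' split
  all_goals rfl

lemma solBStep_keep (s : List Int × Int × List Int) (c : String)
    (h : (c == "C") = false ∧ (c == "Z") = false) : (solBStep s c).2.2 = s.2.2 := by
  obtain ⟨alive, cur, stk⟩ := s
  simp only [solBStep, h.1, h.2, Bool.false_eq_true, if_false]
  repeat' split
  all_goals rfl

lemma foldA_keep (n : Int) (cmd : List String)
    (h : ∀ c ∈ cmd, (c == "C") = false ∧ (c == "Z") = false) :
    ∀ sA : List Int × List Int × List Int × Int, (cmd.foldl (solAStep n) sA).1 = sA.1 := by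
  induction cmd with
  | nil => intro sA; rfl
  | cons c0 cmd ih =>
    intro sA
    rw [List.foldl_cons, ih (fun c hc => h c (by simp [hc])),
      solAStep_keep n sA c0 (h c0 (by simp))]

lemma foldB_keep (cmd : List String)
    (h : ∀ c ∈ cmd, (c == "C") = false ∧ (c == "Z") = false) :
    ∀ sB : List Int × Int × List Int, (cmd.foldl solBStep sB).2.2 = sB.2.2 := by
  induction cmd with
  | nil => intro sB; rfl
  | cons c0 cmd ih =>
    intro sB
    rw [List.foldl_cons, ih (fun c hc => h c (by simp [hc])),
      solBStep_keep sB c0 (h c0 (by simp))]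


-- ---- interval checker facts ----
lemma ivLen_nonneg : ∀ ivs : List (Int × Int), IvSorted ivs → 0 ≤ ivLen ivs := by
  intro ivs
  induction ivs with
  | nil => intro _; simp [ivLen]
  | cons q rest ih =>
    obtain ⟨a, b⟩ := q
    intro hs
    obtain ⟨hab, _, hrec⟩ := hs
    have := ih hrec
    simp only [ivLen]
    omega

lemma ivFlat_append (l1 l2 : List (Int × Int)) : ivFlat (l1 ++ l2) = ivFlat l1 ++ ivFlat l2 := by
  induction l1 with
  | nil => simp [ivFlat]
  | cons q rest ih =>
    obtain ⟨a, b⟩ := q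
    simp [ivFlat, ih]

lemma ivLen_flat : ∀ ivs : List (Int × Int), IvSorted ivs →
    (((ivFlat ivs).length : Nat) : Int) = ivLen ivs := by
  intro ivs
  induction ivs with
  | nil => intro _; simp [ivFlat, ivLen]
  | cons q rest ih =>
    obtain ⟨a, b⟩ := q
    intro hs
    obtain ⟨hab, _, hrec⟩ := hs
    have := ih hrec
    simp only [ivFlat, ivLen, List.length_append, PySem.List.length_pyRange_one]
    push_cast
    omega

lemma ivGet_flat : ∀ (ivs : List (Int × Int)) (p : Int), IvSorted ivs → 0 ≤ p → p < ivLen ivs →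
    ivGet ivs p = (ivFlat ivs).getD p.toNat 0 := by
  intro ivs
  induction ivs with
  | nil => intro p _ h0 hlt; simp [ivLen] at hlt; omega
  | cons q rest ih =>
    obtain ⟨a, b⟩ := q
    intro p hs h0 hlt
    obtain ⟨hab, hgt, hrec⟩ := hs
    simp only [ivLen] at hlt
    have hlr0 : 0 ≤ ivLen rest := ivLen_nonneg rest hrec
    by_cases hp : p < b - a + 1
    · simp only [ivGet, if_pos hp, ivFlat]
      rw [List.getD_append _ _ _ _ (by rw [PySem.List.length_pyRange_one]; omega),
        List.getD_eq_getElem _ _ (by rw [PySem.List.length_pyRange_one]; omega),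
        PySem.List.getElem_pyRange_one a (b+1) p.toNat (by rw [PySem.List.length_pyRange_one]; omega)]
      omega
    · simp only [ivGet, if_neg hp, ivFlat]
      rw [List.getD_append_right _ _ _ _ (by rw [PySem.List.length_pyRange_one]; omega),
        ih (p - (b - a + 1)) hrec (by omega) (by omega)]
      congr 1
      rw [PySem.List.length_pyRange_one]
      omega

lemma insPos_append_lt (l1 l2 : List Int) (d : Int) (h : ∀ x ∈ l1, x < d) :
    insPos (l1 ++ l2) d = l1.length + insPos l2 d := by
  induction l1 with
  | nil => simp
  | cons x xs ih =>
    simp only [List.cons_append, insPos, if_pos (h x (by simp)), List.length_cons,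
      ih (fun y hy => h y (by simp [hy]))]
    omega

lemma ivErase_props : ∀ (ivs : List (Int × Int)) (p : Int), IvSorted ivs → 0 ≤ p → p < ivLen ivs →
    IvSorted (ivErase ivs p) ∧
    (∀ lb : Int, (∀ q ∈ ivs, lb < q.1) → ∀ q ∈ ivErase ivs p, lb < q.1) ∧
    ivFlat (ivErase ivs p) = (ivFlat ivs).eraseIdx p.toNat := by
  intro ivs
  induction ivs with
  | nil => intro p _ h0 hlt; simp [ivLen] at hlt; omega
  | cons q rest ih =>
    obtain ⟨a, b⟩ := q
    intro p hs h0 hlt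
    obtain ⟨hab, hgt, hrec⟩ := hs
    simp only [ivLen] at hlt
    have hlr0 : 0 ≤ ivLen rest := ivLen_nonneg rest hrec
    by_cases hp : p < b - a + 1
    · simp only [ivErase, if_pos hp]
      have e1 : ivFlat (if 1 ≤ p then [(a, a + p - 1)] else []) = PySem.List.pyRange a (a+p) 1 := by
        by_cases h1 : 1 ≤ p
        · simp only [if_pos h1, ivFlat, List.append_nil]
          congr 1
          omega
        · simp only [if_neg h1, ivFlat]
          rw [PySem.List.pyRange_one_eq_nil (by omega)]
      have e2 : ivFlat (if a + p + 1 ≤ b then [(a + p + 1, b)] else [])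
          = PySem.List.pyRange (a+p+1) (b+1) 1 := by
        by_cases h2 : a + p + 1 ≤ b
        · simp only [if_pos h2, ivFlat, List.append_nil]
        · simp only [if_neg h2, ivFlat]
          rw [PySem.List.pyRange_one_eq_nil (by omega)]
      refine ⟨?_, ?_, ?_⟩
      · by_cases h1 : 1 ≤ p <;> by_cases h2 : a + p + 1 ≤ b
        · simp only [if_pos h1, if_pos h2, List.cons_append, List.nil_append]
          exact ⟨by omega, by
              intro qq hqq
              rcases List.mem_cons.1 hqq with rfl | hqq
              · show a + p - 1 < a + p + 1; omega
              · have := hgt qq hqq; omega,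
            by omega, hgt, hrec⟩
        · simp only [if_pos h1, if_neg h2, List.cons_append, List.nil_append]
          exact ⟨by omega, by intro qq hqq; have := hgt qq hqq; omega, hrec⟩
        · simp only [if_neg h1, if_pos h2, List.cons_append, List.nil_append]
          exact ⟨by omega, hgt, hrec⟩
        · simp only [if_neg h1, if_neg h2, List.nil_append]
          exact hrec
      · intro lb hlb qq hqq
        have hlba : lb < a := hlb (a, b) (by simp)
        have hrest' : ∀ q ∈ rest, lb < q.1 := fun q hq => hlb q (by simp [hq])
        by_cases h1 : 1 ≤ p <;> by_cases h2 : a + p + 1 ≤ b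
        · rw [if_pos h1, if_pos h2] at hqq
          simp only [List.cons_append, List.nil_append, List.mem_cons] at hqq
          rcases hqq with rfl | rfl | hqq
          · show lb < a; omega
          · show lb < a + p + 1; omega
          · exact hrest' qq hqq
        · rw [if_pos h1, if_neg h2] at hqq
          simp only [List.cons_append, List.nil_append, List.mem_cons] at hqq
          rcases hqq with rfl | hqq
          · show lb < a; omega
          · exact hrest' qq hqq
        · rw [if_neg h1, if_pos h2] at hqq
          simp only [List.cons_append, List.nil_append, List.mem_cons] at hqq
          rcases hqq with rfl | hqq
          · show lb < a + p + 1; omega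
          · exact hrest' qq hqq
        · rw [if_neg h1, if_neg h2] at hqq
          simp only [List.nil_append] at hqq
          exact hrest' qq hqq
      · rw [ivFlat_append, ivFlat_append, e1, e2]
        have hsplit : ivFlat ((a, b) :: rest)
            = PySem.List.pyRange a (a+p) 1 ++
              ((a + p) :: (PySem.List.pyRange (a+p+1) (b+1) 1 ++ ivFlat rest)) := by
          simp only [ivFlat]
          rw [PySem.List.pyRange_one_append a (a+p) (b+1) (by omega) (by omega),
            PySem.List.pyRange_one_cons (by omega : a + p < b + 1), List.append_assoc,
            List.cons_append]
        show _ = (ivFlat ((a, b) :: rest)).eraseIdx p.toNat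
        rw [hsplit,
          List.eraseIdx_append_of_length_le (by rw [PySem.List.length_pyRange_one]; omega),
          show p.toNat - (PySem.List.pyRange a (a+p) 1).length = 0 from by
            rw [PySem.List.length_pyRange_one]; omega,
          List.eraseIdx_zero, List.tail_cons, List.append_assoc]
    · simp only [ivErase, if_neg hp]
      obtain ⟨ih1, ih2, ih3⟩ := ih (p - (b - a + 1)) hrec (by omega) (by omega)
      refine ⟨⟨hab, fun qq hqq => ih2 b hgt qq hqq, ih1⟩, ?_, ?_⟩
      · intro lb hlb qq hqq
        rcases List.mem_cons.1 hqq with rfl | hqq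
        · exact hlb (a, b) (by simp)
        · exact ih2 lb (fun q' hq' => hlb q' (by simp [hq'])) qq hqq
      · simp only [ivFlat, ih3]
        rw [List.eraseIdx_append_of_length_le (by rw [PySem.List.length_pyRange_one]; omega),
          show p.toNat - (PySem.List.pyRange a (b+1) 1).length = (p - (b - a + 1)).toNat from by
            rw [PySem.List.length_pyRange_one]; omega]

lemma take_drop_mid (L F : List Int) (P : Nat) (d : Int) :
    (L ++ F).take (L.length + P) ++ d :: (L ++ F).drop (L.length + P)
      = L ++ (F.take P ++ d :: F.drop P) := by
  rw [List.take_append, List.drop_append, List.take_of_length_le (by omega),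
    List.drop_eq_nil_of_le (by omega), Nat.add_sub_cancel_left]
  simp

lemma ivInsert_props : ∀ (ivs r : List (Int × Int)) (d : Int), IvSorted ivs →
    ivInsert ivs d = some r →
    IvSorted r ∧
    (∀ lb : Int, lb < d → (∀ q ∈ ivs, lb < q.1) → ∀ q ∈ r, lb < q.1) ∧
    ivFlat r = (ivFlat ivs).take (insPos (ivFlat ivs) d) ++ d :: (ivFlat ivs).drop (insPos (ivFlat ivs) d) ∧
    ivCountLt ivs d = (insPos (ivFlat ivs) d : Int) := by
  intro ivs
  induction ivs with
  | nil =>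
    intro r d _ hok
    simp only [ivInsert, Option.some.injEq] at hok
    subst hok
    refine ⟨⟨le_refl d, by simp, trivial⟩, ?_, ?_, ?_⟩
    · intro lb hlb _ qq hqq
      simp only [List.mem_singleton] at hqq
      subst hqq
      simpa using hlb
    · simp [ivFlat, insPos, PySem.List.pyRange_one_singleton]
    · simp [ivCountLt, insPos, ivFlat]
  | cons q rest ih =>
    obtain ⟨a, b⟩ := q
    intro r d hs hok
    obtain ⟨hab, hgt, hrec⟩ := hs
    by_cases hda : d < a
    · simp only [ivInsert, if_pos hda, Option.some.injEq] at hok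
      subst hok
      have hcons : ivFlat ((a, b) :: rest) = a :: (PySem.List.pyRange (a+1) (b+1) 1 ++ ivFlat rest) := by
        simp only [ivFlat]
        rw [PySem.List.pyRange_one_cons (by omega : a < b + 1)]
        simp
      have hpos : insPos (ivFlat ((a, b) :: rest)) d = 0 := by
        rw [hcons]
        simp only [insPos, if_neg (by omega : ¬ a < d)]
      refine ⟨⟨le_refl d, ?_, hab, hgt, hrec⟩, ?_, ?_, ?_⟩
      · intro qq hqq
        rcases List.mem_cons.1 hqq with rfl | hqq
        · simpa using hda
        · have := hgt qq hqq; omega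
      · intro lb hlb hall2 qq hqq
        rcases List.mem_cons.1 hqq with rfl | hqq
        · show lb < d; omega
        · exact hall2 qq hqq
      · rw [hpos]
        simp only [ivFlat, List.take_zero, List.drop_zero]
        rw [PySem.List.pyRange_one_singleton]
        simp
      · rw [hpos]
        simp only [ivCountLt, if_pos (by omega : d ≤ b)]
        omega
    · by_cases hdb : d ≤ b
      · simp [ivInsert, if_neg hda, if_pos hdb] at hok
      · simp only [ivInsert, if_neg hda, if_neg hdb] at hok
        cases hrest : ivInsert rest d with
        | none => rw [hrest] at hok; simp at hok
        | some r' =>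
          rw [hrest] at hok
          simp only [Option.map_some, Option.some.injEq] at hok
          subst hok
          obtain ⟨ihS, ihLb, ihFlat, ihCnt⟩ := ih r' d hrec hrest
          have hbd : b < d := by omega
          have hall : ∀ x ∈ PySem.List.pyRange a (b+1) 1, x < d := by
            intro x hx
            rw [PySem.List.mem_pyRange_one] at hx
            omega
          have hgtrest : ∀ q ∈ rest, b < q.1 := hgt
          have hpos : insPos (PySem.List.pyRange a (b+1) 1 ++ ivFlat rest) d
              = (PySem.List.pyRange a (b+1) 1).length + insPos (ivFlat rest) d :=
            insPos_append_lt _ _ d hall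
          refine ⟨⟨hab, ihLb b hbd hgtrest, ihS⟩, ?_, ?_, ?_⟩
          · intro lb hlb hall2 qq hqq
            rcases List.mem_cons.1 hqq with rfl | hqq
            · exact hall2 (a, b) (by simp)
            · exact ihLb lb hlb (fun q' hq' => hall2 q' (by simp [hq'])) qq hqq
          · rw [show ivFlat ((a, b) :: r') = PySem.List.pyRange a (b+1) 1 ++ ivFlat r' from rfl,
              ihFlat,
              show ivFlat ((a, b) :: rest) = PySem.List.pyRange a (b+1) 1 ++ ivFlat rest from rfl,
              hpos, take_drop_mid]
          · rw [show ivFlat ((a, b) :: rest) = PySem.List.pyRange a (b+1) 1 ++ ivFlat rest from rfl,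
              hpos]
            simp only [ivCountLt, if_neg (by omega : ¬ d ≤ b), ihCnt,
              PySem.List.length_pyRange_one]
            push_cast
            omega

lemma ivStep_ok (c : String) (ivs : List (Int × Int)) (cur : Int) (stk : List Int)
    (s' : List (Int × Int) × Int × List Int)
    (hs : IvSorted ivs) (h : ivStep c (ivs, cur, stk) = some s') :
    IvSorted s'.1 ∧
    okStep c (ivFlat ivs, cur, stk) = some (ivFlat s'.1, s'.2.1, s'.2.2) := by
  have hlen := ivLen_flat ivs hs
  by_cases hC : (c == "C") = true
  · simp only [ivStep, hC, if_true] at h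
    by_cases hg : 2 ≤ ivLen ivs ∧ 0 ≤ cur ∧ cur < ivLen ivs
    case neg => rw [if_neg hg] at h; exact absurd h (by simp)
    rw [if_pos hg, Option.some.injEq] at h
    subst h
    obtain ⟨hE1, _, hE3⟩ := ivErase_props ivs cur hs hg.2.1 hg.2.2
    refine ⟨hE1, ?_⟩
    simp only [okStep, hC, if_true]
    rw [if_pos (by constructor; omega; constructor; exact hg.2.1; omega :
      2 ≤ (ivFlat ivs).length ∧ 0 ≤ cur ∧ cur < ((ivFlat ivs).length : Int))]
    have hlE : (((ivFlat ivs).eraseIdx cur.toNat).length : Int) = ivLen ivs - 1 := by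
      rw [List.length_eraseIdx, if_pos (by omega)]
      omega
    rw [hlE, ← hE3, ← ivGet_flat ivs cur hs hg.2.1 hg.2.2]
  · by_cases hZ : (c == "Z") = true
    · cases hstkr : stk.reverse with
      | nil =>
        simp only [ivStep, hC, hZ, Bool.false_eq_true, if_false, if_true, hstkr] at h
        exact absurd h (by simp)
      | cons y rest =>
        simp only [ivStep, hC, hZ, Bool.false_eq_true, if_false, if_true, hstkr] at h
        cases hins : ivInsert ivs y with
        | none => rw [hins] at h; simp at h
        | some ivs' =>
          rw [hins] at h
          simp only [Option.some.injEq] at h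
          subst h
          obtain ⟨hS, _, hFlat, hCnt⟩ := ivInsert_props ivs ivs' y hs hins
          refine ⟨hS, ?_⟩
          simp only [okStep, hC, hZ, Bool.false_eq_true, if_false, if_true, hstkr]
          rw [← hFlat, ← hCnt]
    · simp only [ivStep, hC, hZ, Bool.false_eq_true, if_false] at h
      simp only [okStep, hC, hZ, Bool.false_eq_true, if_false]
      cases hmv : moveOk c with
      | none => rw [hmv] at h; exact absurd h (by simp)
      | some pv =>
        obtain ⟨isU, v⟩ := pv
        rw [hmv] at h
        cases isU with
        | true =>
          dsimp only at h ⊢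
          by_cases hvg : 0 ≤ v ∧ v ≤ cur
          case neg => rw [if_neg hvg] at h; exact absurd h (by simp)
          rw [if_pos hvg, Option.some.injEq] at h
          subst h
          rw [if_pos hvg]
          exact ⟨hs, rfl⟩
        | false =>
          dsimp only at h ⊢
          by_cases hvg : 0 ≤ v ∧ cur + v ≤ ivLen ivs - 1
          case neg => rw [if_neg hvg] at h; exact absurd h (by simp)
          rw [if_pos hvg, Option.some.injEq] at h
          subst h
          rw [if_pos (by constructor; exact hvg.1; omega :
            0 ≤ v ∧ cur + v ≤ ((ivFlat ivs).length : Int) - 1)]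
          exact ⟨hs, rfl⟩

lemma foldl_bind_none_iv (cmd : List String) :
    cmd.foldl (fun (s : Option (List (Int × Int) × Int × List Int)) c => s.bind (ivStep c)) none
      = none := by
  induction cmd with
  | nil => rfl
  | cons c cmd ih => simpa using ih

lemma ivfold_ok (cmd : List String) : ∀ (ivs : List (Int × Int)) (cur : Int) (stk : List Int),
    IvSorted ivs →
    (cmd.foldl (fun s c => s.bind (ivStep c)) (some (ivs, cur, stk))).isSome = true →
    (cmd.foldl (fun s c => s.bind (okStep c)) (some (ivFlat ivs, cur, stk))).isSome = true := by
  induction cmd with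
  | nil => intro _ _ _ _ _; simp
  | cons c cmd ih =>
    intro ivs cur stk hs hfold
    simp only [List.foldl_cons] at hfold ⊢
    cases hok : ivStep c (ivs, cur, stk) with
    | none =>
      rw [show (some (ivs, cur, stk)).bind (ivStep c) = none by simp [hok],
        foldl_bind_none_iv] at hfold
      simp at hfold
    | some s' =>
      obtain ⟨ivs', cur', stk'⟩ := s'
      obtain ⟨hS, hOk⟩ := ivStep_ok c ivs cur stk _ hs hok
      rw [show (some (ivs, cur, stk)).bind (ivStep c) = some (ivs', cur', stk') by simp [hok]] at hfold
      rw [show (some (ivFlat ivs, cur, stk)).bind (okStep c)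
          = some (ivFlat ivs', cur', stk') by simp [hOk]]
      exact ih ivs' cur' stk' hS hfold

-- ===== VERDICT (by name: the statement is the Claim_ definition above) =====
theorem solution_spec : Claim_equal_solution := by
  intro n k cmd _hdom hpre
  rcases hpre with rfl | ⟨h1, h2, h3, h4⟩
  · rfl
  unfold Spec_solution solution solution_alt
  rcases h4 with h4 | h4
  · have hflat : ivFlat [(1, n)] = PySem.List.pyRange 1 (n+1) 1 := by
      simp [ivFlat]
    have h4' := ivfold_ok cmd [(1, n)] k [] ⟨h1, by simp, trivial⟩ h4
    rw [hflat] at h4'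
    have := main_inv n cmd _ _ (init_good n k h1 h2 h3) h4'
    simp only [this]
  · have hmoves := walk_all_moves n cmd (k + 2) h4
    simp only [foldA_keep n cmd hmoves, foldB_keep cmd hmoves, List.foldl_nil]
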